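-- pv_equiv track=rewrite | github.com/wuchen0901/algorithm | knapsack/item_count_optimization.py | knapsack_max_items_01
-- ===== SOURCE A (Python) =====
-- from math import inf
-- from typing import Iterable, List
--
-- def _sanitize_weights(weights: Iterable[int], capacity: int) -> List[int]:
--     """Filter out non-positive weights and those exceeding capacity."""
--     if capacity <= 0:
--         return []
--     return [w for w in weights if 1 <= w <= capacity]
--
-- def knapsack_max_items_01(weights: Iterable[int], capacity: int) -> int:
--     """
--     0-1 knapsack: maximum number of items that can be packed without
--     exceeding ``capacity``. Returns 0 if no positive-weight items fit.
--     """
--     valid = _sanitize_weights(weights, capacity)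
--     if not valid:
--         return 0
--     dp = [-inf] * (capacity + 1)
--     dp[0] = 0
--     for weight in valid:
--         for total in range(capacity, weight - 1, -1):
--             if dp[total - weight] != -inf:
--                 dp[total] = max(dp[total], dp[total - weight] + 1)
--     best = max((count for count in dp if count >= 0), default=0)
--     return int(best)
-- ===== SOURCE B (Python) =====
-- def knapsack_max_items_01(weights, capacity):
--     count = 0
--     remaining = capacity
--     for w in sorted(w for w in weights if w > 0):
--         if w <= remaining:
--             count += 1
--             remaining -= w
--     return count
-- ===== Notes on version B (the rewrite author's own statement) =====
-- stated objective: faster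
-- what changed: Replaces the O(n*capacity) 0-1 knapsack DP table by the exact greedy for unit values: sort the positive weights ascending and take items while they fit, O(n log n) and independent of capacity.
import Mathlib
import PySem

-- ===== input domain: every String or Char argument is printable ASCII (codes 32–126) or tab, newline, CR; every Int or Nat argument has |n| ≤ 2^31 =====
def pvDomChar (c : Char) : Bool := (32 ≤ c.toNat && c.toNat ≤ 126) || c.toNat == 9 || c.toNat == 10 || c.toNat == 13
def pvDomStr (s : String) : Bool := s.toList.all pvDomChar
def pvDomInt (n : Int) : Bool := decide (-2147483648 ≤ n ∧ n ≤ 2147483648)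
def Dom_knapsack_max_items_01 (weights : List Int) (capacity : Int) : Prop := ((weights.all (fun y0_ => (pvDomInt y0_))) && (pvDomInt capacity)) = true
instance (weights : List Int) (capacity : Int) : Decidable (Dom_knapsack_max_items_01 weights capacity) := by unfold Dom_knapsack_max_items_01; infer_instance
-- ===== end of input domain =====

-- B replaces A's O(n*capacity) 0-1 knapsack DP by the exact greedy for unit values
-- (sort the positive weights ascending, take while they fit): same return value, faster.

-- ===== PORT A =====
-- helper `_sanitize_weights`
def pvSanitizeA (weights : List Int) (capacity : Int) : List Int :=
  if capacity ≤ 0 then []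
  else weights.filter (fun w => decide (1 ≤ w ∧ w ≤ capacity))

-- a dp cell: `none` models Python's -inf (max(-inf, x) = x; `-inf >= 0` is False).
-- `.getD none` only totalises pyGet?: every index A's loops read is in range.
def pvCell (dp : List (Option Int)) (i : Int) : Option Int :=
  (PySem.List.pyGet? dp i).getD none

-- body of the inner loop: `if dp[total - weight] != -inf: dp[total] = max(dp[total], dp[total - weight] + 1)`
def pvStepA (weight : Int) (dp : List (Option Int)) (total : Int) : List (Option Int) :=
  match pvCell dp (total - weight) with
  | none => dp
  | some c =>
      PySem.List.pySetD dp total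
        (some (match pvCell dp total with
               | none => c + 1
               | some o => max o (c + 1)))

-- the inner `for total in range(capacity, weight - 1, -1)` loop
def pvInnerA (capacity weight : Int) (dp0 : List (Option Int)) : List (Option Int) :=
  (PySem.List.pyRange capacity (weight - 1) (-1)).foldl (pvStepA weight) dp0

def knapsack_max_items_01 (weights : List Int) (capacity : Int) : Int :=
  let valid := pvSanitizeA weights capacity
  if valid = [] then 0
  else
    let dp0 : List (Option Int) :=
      PySem.List.pySetD (List.replicate (capacity + 1).toNat (none : Option Int)) 0 (some 0)
    let dp := valid.foldl (fun dp weight => pvInnerA capacity weight dp) dp0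
    PySem.List.maxD
      (dp.filterMap (fun cell => cell.bind (fun c => if 0 ≤ c then some c else none)))
      (fun x => x) 0

-- ===== PORT B =====
def knapsack_max_items_01_alt (weights : List Int) (capacity : Int) : Int :=
  ((PySem.List.sorted (weights.filter (fun w => decide (0 < w))) (fun w => w) false).foldl
    (fun acc w => if w ≤ acc.2 then (acc.1 + 1, acc.2 - w) else acc)
    ((0 : Int), capacity)).1

-- ===== PRECONDITION & SPEC =====
def Spec_knapsack_max_items_01 (weights : List Int) (capacity : Int) (out : Int) : Prop := out = knapsack_max_items_01_alt weights capacity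
instance (weights : List Int) (capacity : Int) (out : Int) : Decidable (Spec_knapsack_max_items_01 weights capacity out) := by unfold Spec_knapsack_max_items_01; infer_instance

-- ===== CLAIM (what is proved, stated in full; the proofs are below) =====
def Claim_equal_knapsack_max_items_01 : Prop := ∀ (weights : List Int) (capacity : Int), Dom_knapsack_max_items_01 weights capacity → Spec_knapsack_max_items_01 weights capacity (knapsack_max_items_01 weights capacity)

-- ===== LEMMAS AND PROOFS =====

-- max on Option Int with `none` as -inf
def omax : Option Int → Option Int → Option Int
  | none, b => b
  | some a, none => some a
  | some a, some b => some (max a b)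

-- model of A's dp: MM A t = the largest number of items of A summing exactly to t (none if no subset)
def MM : List Int → Int → Option Int
  | [], t => if t = 0 then some 0 else none
  | w :: A, t => omax (MM A t) (if w ≤ t then (MM A (t - w)).map (· + 1) else none)

theorem omax_none_right (a : Option Int) : omax a none = a := by cases a <;> rfl

theorem map_add_omax (a b : Option Int) :
    (omax a b).map (· + 1) = omax (a.map (· + 1)) (b.map (· + 1)) := by
  cases a <;> cases b <;> simp [omax, max_add_add_right]

theorem MM_nonneg : ∀ (A : List Int) (t : Int) (k : Int), MM A t = some k → 0 ≤ k := by
  intro A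
  induction A with
  | nil => intro t k h; simp [MM] at h; omega
  | cons a A ih =>
    intro t k h
    have h2 : ∀ k2, (if a ≤ t then (MM A (t - a)).map (· + 1) else none) = some k2 → 0 ≤ k2 := by
      intro k2 hy
      split at hy
      · rcases hz : MM A (t - a) with _ | c
        · simp [hz] at hy
        · simp [hz] at hy; have := ih _ _ hz; omega
      · simp at hy
    simp only [MM] at h
    rcases hx : MM A t with _ | k1 <;>
      rcases hy : (if a ≤ t then (MM A (t - a)).map (· + 1) else none) with _ | k2 <;>
      rw [hx, hy] at h <;> simp [omax] at h
    · exact h ▸ h2 _ hy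
    · exact h ▸ ih _ _ hx
    · have u1 := ih _ _ hx
      have u2 := h2 _ hy
      omega

theorem MM_append {w : Int} (hw : 1 ≤ w) :
    ∀ (A : List Int), (∀ x ∈ A, 1 ≤ x) → ∀ t : Int,
    MM (A ++ [w]) t = omax (MM A t) (if w ≤ t then (MM A (t - w)).map (· + 1) else none) := by
  intro A
  induction A with
  | nil => intro _ t; rfl
  | cons a A ih =>
    intro hpos t
    have ha : 1 ≤ a := hpos a (by simp)
    have hA : ∀ x ∈ A, 1 ≤ x := fun x hx => hpos x (by simp [hx])
    show omax (MM (A ++ [w]) t) (if a ≤ t then (MM (A ++ [w]) (t - a)).map (· + 1) else none) = _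
    rw [ih hA t, ih hA (t - a)]
    show _ = omax (omax (MM A t) (if a ≤ t then (MM A (t - a)).map (· + 1) else none))
      (if w ≤ t then (omax (MM A (t - w)) (if a ≤ t - w then (MM A (t - w - a)).map (· + 1) else none)).map (· + 1) else none)
    by_cases h3 : a + w ≤ t
    · have h1 : a ≤ t := by omega
      have h2 : w ≤ t := by omega
      have e1 : w ≤ t - a := by omega
      have e2 : a ≤ t - w := by omega
      have e3 : t - a - w = t - w - a := by omega
      simp only [if_pos h1, if_pos h2, if_pos e1, if_pos e2, e3, map_add_omax]
      rcases MM A t with _ | x <;> rcases MM A (t - w) with _ | y <;>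
        rcases MM A (t - a) with _ | z <;> rcases MM A (t - w - a) with _ | u <;>
        simp [omax, max_comm, max_left_comm]
    · by_cases h1 : a ≤ t <;> by_cases h2 : w ≤ t
      · have e1 : ¬ w ≤ t - a := by omega
        have e2 : ¬ a ≤ t - w := by omega
        simp only [if_pos h1, if_pos h2, if_neg e1, if_neg e2, omax_none_right]
        rcases MM A t with _ | x <;> rcases MM A (t - w) with _ | y <;>
          rcases MM A (t - a) with _ | z <;>
          simp [omax, max_comm, max_left_comm]
      · have e1 : ¬ w ≤ t - a := by omega
        simp only [if_pos h1, if_neg h2, if_neg e1, omax_none_right]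
      · have e2 : ¬ a ≤ t - w := by omega
        simp only [if_neg h1, if_pos h2, if_neg e2, omax_none_right]
      · simp only [if_neg h1, if_neg h2, omax_none_right]

-- (P1) every value some k of MM is realised by a sublist
theorem MM_some_achieve : ∀ (A : List Int) (t k : Int), MM A t = some k →
    ∃ s : List Int, s.Sublist A ∧ s.sum = t ∧ (s.length : Int) = k := by
  intro A
  induction A with
  | nil =>
    intro t k h; simp [MM] at h
    exact ⟨[], by simp [h.1, ← h.2]⟩
  | cons a A ih =>
    intro t k h
    simp only [MM] at h
    rcases hx : MM A t with _ | k1 <;>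
      rcases hy : (if a ≤ t then (MM A (t - a)).map (· + 1) else none) with _ | k2 <;>
      simp [hx, hy, omax] at h
    · -- only the second branch
      obtain ⟨c, hc, rfl⟩ : ∃ c, MM A (t - a) = some c ∧ k2 = c + 1 := by
        split at hy
        · rcases hz : MM A (t - a) with _ | c <;> simp [hz] at hy
          exact ⟨c, rfl, hy.symm⟩
        · simp at hy
      obtain ⟨s, hs, hsum, hlen⟩ := ih _ _ hc
      exact ⟨a :: s, by subst h; exact ⟨(hs.cons_cons a), by simp [hsum], by simp only [List.length_cons]; push_cast; omega⟩⟩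
    · obtain ⟨s, hs, hsum, hlen⟩ := ih _ _ hx
      exact ⟨s, hs.cons _, hsum, by omega⟩
    · -- k = max k1 k2
      obtain ⟨c, hc, rfl⟩ : ∃ c, MM A (t - a) = some c ∧ k2 = c + 1 := by
        split at hy
        · rcases hz : MM A (t - a) with _ | c <;> simp [hz] at hy
          exact ⟨c, rfl, hy.symm⟩
        · simp at hy
      rcases le_total k1 (c + 1) with hle | hle
      · obtain ⟨s, hs, hsum, hlen⟩ := ih _ _ hc
        refine ⟨a :: s, hs.cons_cons a, by simp [hsum], ?_⟩
        subst h; rw [max_eq_right hle]; simp only [List.length_cons]; push_cast; omega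
      · obtain ⟨s, hs, hsum, hlen⟩ := ih _ _ hx
        refine ⟨s, hs.cons _, hsum, ?_⟩
        subst h; rw [max_eq_left hle]; omega

theorem omax_some_left (x : Int) (b : Option Int) :
    ∃ m, omax (some x) b = some m ∧ x ≤ m := by
  cases b with
  | none => exact ⟨x, rfl, le_refl x⟩
  | some y => exact ⟨max x y, rfl, le_max_left x y⟩

theorem omax_some_right (y : Int) (a : Option Int) :
    ∃ m, omax a (some y) = some m ∧ y ≤ m := by
  cases a with
  | none => exact ⟨y, rfl, le_refl y⟩
  | some x => exact ⟨max x y, rfl, le_max_right x y⟩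

-- (P2) MM dominates every sublist
theorem MM_ge : ∀ (A : List Int), (∀ x ∈ A, 1 ≤ x) → ∀ (s : List Int), s.Sublist A →
    ∃ k, MM A s.sum = some k ∧ (s.length : Int) ≤ k := by
  intro A
  induction A with
  | nil =>
    intro _ s hs
    simp [List.sublist_nil.mp hs, MM]
  | cons a A ih =>
    intro hpos s hs
    have ha : 1 ≤ a := hpos a (by simp)
    have hA : ∀ x ∈ A, 1 ≤ x := fun x hx => hpos x (by simp [hx])
    rcases List.sublist_cons_iff.mp hs with h | ⟨r, rfl, hr⟩
    · obtain ⟨k, hk, hlen⟩ := ih hA s h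
      obtain ⟨m, hm, hxm⟩ := omax_some_left k
        (if a ≤ s.sum then (MM A (s.sum - a)).map (· + 1) else none)
      refine ⟨m, ?_, by omega⟩
      simp only [MM, hk]; exact hm
    · obtain ⟨k, hk, hlen⟩ := ih hA r hr
      have hr0 : 0 ≤ r.sum := List.sum_nonneg (fun x hx => by have := hA x (hr.mem hx); omega)
      have hcond : a ≤ (a :: r).sum := by simp; omega
      have hsub : (a :: r).sum - a = r.sum := by simp
      obtain ⟨m, hm, hxm⟩ := omax_some_right (k + 1) (MM A ((a :: r).sum))
      refine ⟨m, ?_, ?_⟩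
      · simp only [MM, if_pos hcond, hsub, hk, Option.map_some]; exact hm
      · simp only [List.length_cons]; push_cast; omega

-- ===== the dp array implements MM =====

theorem pvCell_eq (dp : List (Option Int)) {i : Int} (h0 : 0 ≤ i) :
    pvCell dp i = dp.getD i.toNat none := by
  simp [pvCell, PySem.List.pyGet?_of_nonneg _ h0, List.getD_eq_getElem?_getD]

theorem getD_set_eq (l : List (Option Int)) (i t : Nat) (hi : i < l.length) (v : Option Int) :
    (l.set i v).getD t none = if t = i then v else l.getD t none := by
  by_cases h : t = i
  · subst h
    rw [if_pos rfl, List.getD_eq_getElem?_getD, List.getElem?_set_self hi]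
    rfl
  · rw [if_neg h, List.getD_eq_getElem?_getD, List.getElem?_set_ne (by omega),
      List.getD_eq_getElem?_getD]

theorem pvStepA_length (w : Int) (dp : List (Option Int)) (total : Int) :
    (pvStepA w dp total).length = dp.length := by
  unfold pvStepA
  cases pvCell dp (total - w) <;> simp [PySem.List.length_pySetD]

theorem pvInnerA_length (cap w : Int) (dp : List (Option Int)) :
    (pvInnerA cap w dp).length = dp.length := by
  unfold pvInnerA
  generalize PySem.List.pyRange cap (w - 1) (-1) = ts
  induction ts generalizing dp with
  | nil => rfl
  | cons t ts ih =>
    simp only [List.foldl_cons]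
    rw [ih (pvStepA w dp t), pvStepA_length]

theorem inner_go {cap w : Int} {A : List Int} (hw : 1 ≤ w) (hA : ∀ x ∈ A, 1 ≤ x) :
    ∀ (k : Nat) (dp : List (Option Int)), dp.length = (cap + 1).toNat →
    w - 1 + k ≤ cap →
    (∀ t : Nat, t < dp.length → dp.getD t none =
        if w ≤ (t : Int) ∧ (w - 1 + k : Int) < (t : Int) then MM (A ++ [w]) t else MM A t) →
    ∀ t : Nat, t < dp.length →
      ((PySem.List.pyRange (w - 1 + k) (w - 1) (-1)).foldl (pvStepA w) dp).getD t none =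
        if w ≤ (t : Int) then MM (A ++ [w]) t else MM A t := by
  intro k
  induction k with
  | zero =>
    intro dp hlen hle hinv t ht
    rw [show ((w - 1 + ((0:Nat):Int))) = w - 1 by push_cast; ring]
    rw [PySem.List.pyRange_neg_one_eq_nil le_rfl]
    simp only [List.foldl_nil]
    rw [hinv t ht]
    by_cases hwt : w ≤ (t : Int)
    · rw [if_pos ⟨hwt, by push_cast; omega⟩, if_pos hwt]
    · rw [if_neg (fun hc => hwt hc.1), if_neg hwt]
  | succ k ihk =>
    intro dp hlen hle hinv t ht
    have ha1 : (w - 1 : Int) < w - 1 + ((k:Nat) + 1 : Nat) := by push_cast; omega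
    rw [PySem.List.pyRange_neg_one_cons ha1]
    simp only [List.foldl_cons]
    rw [show (w - 1 + ((k:Nat) + 1 : Nat) - 1 : Int) = w - 1 + (k : Int) by push_cast; ring]
    -- the value of `a`, the index this first step writes
    have hacap : w - 1 + ((k:Int) + 1) ≤ cap := by push_cast at hle; omega
    have hreadsub : pvCell dp ((w - 1 + ((k:Nat) + 1 : Nat)) - w) = MM A (w - 1 + ((k:Int) + 1) - w) := by
      rw [pvCell_eq dp (by push_cast; omega)]
      have hidx : ((w - 1 + ((k:Nat) + 1 : Nat) - w).toNat) < dp.length := by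
        rw [hlen]; push_cast; omega
      rw [hinv _ hidx]
      rw [Int.toNat_of_nonneg (by push_cast; omega)]
      rw [if_neg (by push_cast; omega)]
      push_cast
      ring_nf
    have hreadt : pvCell dp (w - 1 + ((k:Nat) + 1 : Nat)) = MM A (w - 1 + ((k:Int) + 1)) := by
      rw [pvCell_eq dp (by push_cast; omega)]
      have hidx : ((w - 1 + ((k:Nat) + 1 : Nat)).toNat) < dp.length := by
        rw [hlen]; push_cast; omega
      rw [hinv _ hidx]
      rw [Int.toNat_of_nonneg (by push_cast; omega)]
      rw [if_neg (by push_cast; omega)]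
      push_cast
      ring_nf
    have hstep : ∀ t : Nat, t < dp.length →
        (pvStepA w dp (w - 1 + ((k:Nat) + 1 : Nat))).getD t none =
        if w ≤ (t : Int) ∧ (w - 1 + (k:Int)) < (t : Int) then MM (A ++ [w]) t else MM A t := by
      intro u hu
      by_cases hua : (u : Int) = w - 1 + ((k:Int) + 1)
      · -- the written cell
        have hcond : w ≤ (u : Int) ∧ (w - 1 + (k:Int)) < (u : Int) := by omega
        rw [if_pos hcond]
        have hMMa : MM (A ++ [w]) (u : Int) =
            omax (MM A u) (if w ≤ (u:Int) then (MM A ((u:Int) - w)).map (· + 1) else none) :=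
          MM_append hw A hA u
        unfold pvStepA
        rw [hreadsub]
        rcases hc : MM A (w - 1 + ((k:Int) + 1) - w) with _ | c
        · -- no update
          dsimp only
          rw [hinv u hu, if_neg (by omega)]
          rw [hMMa, if_pos hcond.1]
          rw [show ((u:Int) - w) = w - 1 + ((k:Int) + 1) - w by omega, hc]
          simp [omax_none_right]
        · -- update written
          dsimp only
          rw [PySem.List.pySetD_of_nonneg _ _ (by push_cast; omega)]
          have htoNat : ((w - 1 + ((k:Nat) + 1 : Nat)) : Int).toNat = u := by push_cast; omega
          rw [getD_set_eq _ _ _ (by rw [htoNat]; exact hu) _, htoNat, if_pos rfl]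
          rw [hreadt]
          rw [hMMa, if_pos hcond.1]
          rw [show ((u:Int) - w) = w - 1 + ((k:Int) + 1) - w by omega, hc]
          rw [show ((u:Int)) = w - 1 + ((k:Int) + 1) by omega]
          rcases MM A (w - 1 + ((k:Int) + 1)) with _ | o <;> simp [omax]
      · -- untouched cell
        have huntouched : (pvStepA w dp (w - 1 + ((k:Nat) + 1 : Nat))).getD u none = dp.getD u none := by
          unfold pvStepA
          rcases hc : pvCell dp ((w - 1 + ((k:Nat) + 1 : Nat)) - w) with _ | c
          · rfl
          · dsimp only
            rw [PySem.List.pySetD_of_nonneg _ _ (by push_cast; omega)]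
            rw [getD_set_eq _ _ _ (by rw [hlen]; push_cast; omega) _]
            rw [if_neg (by push_cast at hua ⊢; omega)]
        rw [huntouched, hinv u hu]
        have : (w ≤ (u:Int) ∧ (w - 1 + (((k:Nat)+1:Nat)):Int) < (u:Int)) ↔
            (w ≤ (u:Int) ∧ (w - 1 + (k:Int)) < (u:Int)) := by push_cast at hua ⊢; omega
        simp only [this]
    have hlen1 : (pvStepA w dp (w - 1 + ((k:Nat) + 1 : Nat))).length = dp.length := pvStepA_length _ _ _
    have := ihk (pvStepA w dp (w - 1 + ((k:Nat) + 1 : Nat)))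
      (hlen1.trans hlen) (by omega)
      (fun t ht => hstep t (hlen1 ▸ ht)) t (hlen1 ▸ ht)
    exact this

theorem outer_go {cap : Int} :
    ∀ (l : List Int) (A : List Int) (dp : List (Option Int)),
    dp.length = (cap + 1).toNat →
    (∀ x ∈ A, 1 ≤ x) → (∀ x ∈ l, 1 ≤ x ∧ x ≤ cap) →
    (∀ t : Nat, t < dp.length → dp.getD t none = MM A t) →
    (l.foldl (fun dp weight => pvInnerA cap weight dp) dp).length = (cap + 1).toNat ∧
    ∀ t : Nat, t < (l.foldl (fun dp weight => pvInnerA cap weight dp) dp).length →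
      (l.foldl (fun dp weight => pvInnerA cap weight dp) dp).getD t none = MM (A ++ l) t := by
  intro l
  induction l with
  | nil =>
    intro A dp hlen hA _ hinv
    simp only [List.foldl_nil, List.append_nil]
    exact ⟨hlen, hinv⟩
  | cons w l ih =>
    intro A dp hlen hA hl hinv
    have hw : 1 ≤ w ∧ w ≤ cap := hl w (by simp)
    simp only [List.foldl_cons]
    have hk : (w - 1 + (((cap - (w - 1)).toNat : Nat) : Int)) = cap := by omega
    have hlen1 : (pvInnerA cap w dp).length = (cap + 1).toNat :=
      (pvInnerA_length cap w dp).trans hlen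
    have hinv1 : ∀ t : Nat, t < (pvInnerA cap w dp).length →
        (pvInnerA cap w dp).getD t none = MM (A ++ [w]) t := by
      intro t ht
      rw [hlen1] at ht
      have hgo := inner_go hw.1 hA ((cap - (w - 1)).toNat) dp hlen (by omega)
        (fun u hu => by
          rw [hinv u hu, if_neg]
          rintro ⟨_, h2⟩
          rw [hlen] at hu
          omega)
        t (by rw [hlen]; exact ht)
      rw [hk] at hgo
      unfold pvInnerA
      rw [hgo]
      by_cases hwt : w ≤ (t : Int)
      · rw [if_pos hwt]
      · rw [if_neg hwt]
        rw [MM_append hw.1 A hA, if_neg hwt, omax_none_right]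
    have := ih (A ++ [w]) (pvInnerA cap w dp) hlen1
      (by intro x hx
          rcases List.mem_append.mp hx with h | h
          · exact hA x h
          · simp at h; subst h; exact hw.1)
      (fun x hx => hl x (by simp [hx])) hinv1
    rw [List.append_assoc] at this
    simpa using this

-- ===== greedy lemmas =====

def gstep : Int × Int → Int → Int × Int :=
  fun acc w => if w ≤ acc.2 then (acc.1 + 1, acc.2 - w) else acc

theorem gshift : ∀ (l : List Int) (k c : Int),
    l.foldl gstep (k, c) = (k + (l.foldl gstep (0, c)).1, (l.foldl gstep (0, c)).2) := by
  intro l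
  induction l with
  | nil => simp
  | cons w l ih =>
    intro k c
    simp only [List.foldl_cons, gstep]
    by_cases h : w ≤ c
    · simp only [if_pos h]
      rw [ih (k + 1) (c - w), ih (0 + 1) (c - w)]
      simp only [Prod.mk.injEq, and_true]
      ring
    · simp only [if_neg h]
      exact ih k c

theorem greedy_nonneg : ∀ (l : List Int) (c : Int), 0 ≤ (l.foldl gstep (0, c)).1 := by
  intro l
  induction l with
  | nil => intro c; simp
  | cons w l ih =>
    intro c
    simp only [List.foldl_cons, gstep]
    by_cases h : w ≤ c
    · simp only [if_pos h]
      rw [gshift]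
      have := ih (c - w); omega
    · simpa [if_neg h] using ih c

theorem greedy_skip {c : Int} : ∀ (l : List Int), (∀ x ∈ l, ¬ x ≤ c) → ∀ k : Int, l.foldl gstep (k, c) = (k, c) := by
  intro l
  induction l with
  | nil => intro _ k; rfl
  | cons w l ih =>
    intro h k
    have hw : ¬ w ≤ c := h w (by simp)
    simp only [List.foldl_cons, gstep, if_neg hw]
    exact ih (fun x hx => h x (by simp [hx])) k

theorem greedy_spec : ∀ (l : List Int) (c : Int), (∀ x ∈ l, 1 ≤ x) → 0 ≤ c →
    ∃ s : List Int, s.Sublist l ∧ (s.length : Int) = (l.foldl gstep (0, c)).1 ∧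
      s.sum + (l.foldl gstep (0, c)).2 = c ∧ 0 ≤ (l.foldl gstep (0, c)).2 := by
  intro l
  induction l with
  | nil => intro c _ hc; exact ⟨[], by simp, by simp, by simp, by simpa⟩
  | cons w l ih =>
    intro c hpos hc
    have hw : 1 ≤ w := hpos w (by simp)
    have hl : ∀ x ∈ l, 1 ≤ x := fun x hx => hpos x (by simp [hx])
    simp only [List.foldl_cons, gstep]
    by_cases h : w ≤ c
    · simp only [if_pos h]
      rw [gshift]
      obtain ⟨s, hs, hlen, hsum, hnn⟩ := ih (c - w) hl (by omega)
      refine ⟨w :: s, hs.cons_cons w, ?_, ?_, hnn⟩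
      · simp only [List.length_cons]; push_cast; omega
      · simp only [List.sum_cons]; omega
    · simp only [if_neg h]
      obtain ⟨s, hs, hlen, hsum, hnn⟩ := ih c hl hc
      exact ⟨s, hs.cons _, hlen, hsum, hnn⟩

theorem greedy_prefix : ∀ (l : List Int) (c : Int) (k : Nat), (∀ x ∈ l, 1 ≤ x) →
    k ≤ l.length → (l.take k).sum ≤ c → (k : Int) ≤ (l.foldl gstep (0, c)).1 := by
  intro l
  induction l with
  | nil =>
    intro c k _ hk _
    simp only [List.length_nil, Nat.le_zero] at hk
    subst hk
    simp
  | cons w l ih =>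
    intro c k hpos hk hsum
    cases k with
    | zero => simpa using greedy_nonneg (w :: l) c
    | succ k =>
      have hw : 1 ≤ w := hpos w (by simp)
      have hl : ∀ x ∈ l, 1 ≤ x := fun x hx => hpos x (by simp [hx])
      have h0 : 0 ≤ (l.take k).sum :=
        List.sum_nonneg fun x hx => by
          have := hl x ((l.take_sublist k).mem hx); omega
      rw [List.take_succ_cons, List.sum_cons] at hsum
      have hwc : w ≤ c := by omega
      simp only [List.foldl_cons, gstep, if_pos hwc]
      rw [gshift]
      have := ih (c - w) k hl (by simpa using hk) (by omega)
      push_cast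
      omega

theorem subperm_cons_elim {s : List Int} {a : Int} {l : List Int} (h : s.Subperm (a :: l)) :
    s.Subperm l ∨ ∃ r, s.Perm (a :: r) ∧ r.Subperm l := by
  obtain ⟨t, htp, hts⟩ := h
  rcases List.sublist_cons_iff.mp hts with h' | ⟨r, rfl, hr⟩
  · exact Or.inl ⟨t, htp, h'⟩
  · exact Or.inr ⟨r, htp.symm, hr.subperm⟩

theorem take_min : ∀ (L : List Int), L.Pairwise (· ≤ ·) → ∀ (s : List Int), s.Subperm L →
    (L.take s.length).sum ≤ s.sum := by
  intro L
  induction L with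
  | nil => intro _ s hs; simp [List.subperm_nil.mp hs]
  | cons w L ih =>
    intro hp s hs
    have hw : ∀ x ∈ L, w ≤ x := (List.pairwise_cons.mp hp).1
    have hpL : L.Pairwise (· ≤ ·) := (List.pairwise_cons.mp hp).2
    rcases subperm_cons_elim hs with h | ⟨r, hperm, hr⟩
    · rcases Nat.eq_zero_or_pos s.length with h0 | h0
      · rw [h0, List.length_eq_zero_iff.mp h0]
        simp
      · have ihs := ih hpL s h
        obtain ⟨k, hk⟩ : ∃ k, s.length = k + 1 := ⟨s.length - 1, by omega⟩
        have hkL : k < L.length := by have := h.length_le; omega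
        rw [hk] at ihs ⊢
        rw [List.take_succ_cons, List.sum_cons]
        rw [List.sum_take_succ L k hkL] at ihs
        have := hw L[k] (List.getElem_mem hkL)
        omega
    · have hlen : s.length = r.length + 1 := by rw [hperm.length_eq]; rfl
      have hsum : s.sum = w + r.sum := by rw [hperm.sum_eq]; simp
      have ihr := ih hpL r hr
      rw [hlen, List.take_succ_cons, List.sum_cons, hsum]
      omega

theorem maxD_eq (xs : List Int) (d : Int) :
    PySem.List.maxD xs (fun x => x) d = (PySem.List.max? xs (fun x => x)).getD d := rfl

theorem sanitize_decomp {weights : List Int} {cap : Int} (hcap : ¬ cap ≤ 0) :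
    pvSanitizeA weights cap =
      (weights.filter (fun w => decide (0 < w))).filter (fun w => decide (w ≤ cap)) := by
  unfold pvSanitizeA
  rw [if_neg hcap, List.filter_filter]
  apply List.filter_congr
  intro x _
  by_cases h1 : (1:Int) ≤ x <;> by_cases h2 : x ≤ cap <;> simp [h1, h2] <;> omega

-- ===== VERDICT (by name: the statement is the Claim_ definition above) =====
theorem knapsack_max_items_01_spec : Claim_equal_knapsack_max_items_01 := by
  intro weights cap _
  unfold Spec_knapsack_max_items_01 knapsack_max_items_01 knapsack_max_items_01_alt
  show (if pvSanitizeA weights cap = [] then (0:Int)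
        else PySem.List.maxD
          (((pvSanitizeA weights cap).foldl (fun dp weight => pvInnerA cap weight dp)
              (PySem.List.pySetD (List.replicate (cap + 1).toNat (none : Option Int)) 0 (some 0))).filterMap
            (fun cell => cell.bind (fun c => if 0 ≤ c then some c else none)))
          (fun x => x) 0)
      = ((PySem.List.sorted (weights.filter (fun w => decide (0 < w))) (fun w => w) false).foldl
          gstep ((0 : Int), cap)).1
  set pos : List Int := weights.filter (fun w => decide (0 < w)) with hposdef
  set L : List Int := PySem.List.sorted pos (fun w => w) false with hLdef
  have hLperm : L.Perm pos := PySem.List.sorted_perm pos (fun w => w) false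
  have hLpos : ∀ x ∈ L, 1 ≤ x := by
    intro x hx
    have hx' : x ∈ pos := hLperm.mem_iff.mp hx
    have := List.of_mem_filter hx'
    simp at this; omega
  by_cases hv : pvSanitizeA weights cap = []
  · rw [if_pos hv]
    have hnofit : ∀ x ∈ L, ¬ x ≤ cap := by
      intro x hx
      have h1 : 1 ≤ x := hLpos x hx
      by_cases hcap : cap ≤ 0
      · omega
      · have hx' : x ∈ pos := hLperm.mem_iff.mp hx
        have hxw : x ∈ weights := List.mem_of_mem_filter hx'
        rw [sanitize_decomp hcap] at hv
        have := List.filter_eq_nil_iff.mp hv x hx'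
        simpa using this
    rw [greedy_skip L hnofit 0]
  · rw [if_neg hv]
    have hcap : ¬ cap ≤ 0 := by
      intro h
      exact hv (by unfold pvSanitizeA; rw [if_pos h])
    set valid : List Int := pvSanitizeA weights cap with hvaliddef
    have hvalid_elems : ∀ x ∈ valid, 1 ≤ x ∧ x ≤ cap := by
      intro x hx
      rw [hvaliddef] at hx
      unfold pvSanitizeA at hx
      rw [if_neg hcap] at hx
      have := List.of_mem_filter hx
      simpa using this
    have hvalid_pos : ∀ x ∈ valid, 1 ≤ x := fun x hx => (hvalid_elems x hx).1
    set dp0 : List (Option Int) :=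
      PySem.List.pySetD (List.replicate (cap + 1).toNat (none : Option Int)) 0 (some 0) with hdp0def
    have hdp0set : dp0 = (List.replicate (cap + 1).toNat (none : Option Int)).set 0 (some 0) := by
      rw [hdp0def, PySem.List.pySetD_of_nonneg _ _ le_rfl]; rfl
    have hdp0len : dp0.length = (cap + 1).toNat := by
      rw [hdp0set]; simp
    have hinv0 : ∀ t : Nat, t < dp0.length → dp0.getD t none = MM [] t := by
      intro t ht
      rw [hdp0len] at ht
      rw [hdp0set, getD_set_eq _ _ _ (by simp; omega) _]
      by_cases h : t = 0
      · subst h; simp [MM]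
      · rw [if_neg h, List.getD_eq_getElem?_getD, List.getElem?_replicate, if_pos ht]
        have h' : ¬ ((t : Int) = 0) := by omega
        simp only [MM, if_neg h', Option.getD_some]
    obtain ⟨hFlen, hFval⟩ := outer_go valid [] dp0 hdp0len (by simp) hvalid_elems hinv0
    set dpF : List (Option Int) :=
      valid.foldl (fun dp weight => pvInnerA cap weight dp) dp0 with hdpFdef
    simp only [List.nil_append] at hFval
    set C : List Int :=
      dpF.filterMap (fun cell => cell.bind (fun c => if 0 ≤ c then some c else none)) with hCdef
    -- membership characterisation of C
    have hCmem1 : ∀ m ∈ C, ∃ t : Nat, t < (cap + 1).toNat ∧ MM valid (t : Int) = some m := by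
      intro m hm
      rw [hCdef] at hm
      obtain ⟨cell, hcell, hf⟩ := List.mem_filterMap.mp hm
      obtain ⟨i, hi, hget⟩ := List.getElem_of_mem hcell
      refine ⟨i, by omega, ?_⟩
      have : dpF.getD i none = cell := by
        rw [List.getD_eq_getElem?_getD, List.getElem?_eq_getElem hi, hget]; rfl
      rw [hFval i (by omega)] at this
      rcases cell with _ | c
      · simp at hf
      · have : MM valid (i : Int) = some c := this
        rcases Classical.em (0 ≤ c) with hc | hc <;> simp [hc] at hf
        rw [this, hf]
    have hCmem2 : ∀ (t : Nat), t < (cap + 1).toNat → ∀ k : Int, MM valid (t : Int) = some k → k ∈ C := by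
      intro t ht k hk
      have hcell : dpF.getD t none = some k := by rw [hFval t (by omega)]; exact hk
      have hmem : (some k) ∈ dpF := by
        have ht' : t < dpF.length := by omega
        rw [List.getD_eq_getElem?_getD, List.getElem?_eq_getElem ht'] at hcell
        have : dpF[t] = some k := by simpa using hcell
        rw [← this]; exact List.getElem_mem ht'
      rw [hCdef]
      exact List.mem_filterMap.mpr ⟨some k, hmem, by simp [MM_nonneg valid t k hk]⟩
    -- the greedy result
    set g : Int := (L.foldl gstep ((0:Int), cap)).1 with hgdef
    -- g ≤ best
    obtain ⟨s, hsub, hslen, hssum, hrnn⟩ := greedy_spec L cap hLpos (by omega)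
    have hsums : s.sum ≤ cap := by omega
    obtain ⟨s', hs'perm, hs'sub⟩ := hsub.subperm.trans hLperm.subperm
    have hs'sum : s'.sum = s.sum := hs'perm.sum_eq
    have hs'pos : ∀ x ∈ s', 1 ≤ x := by
      intro x hx
      have : x ∈ pos := hs'sub.subset hx
      have := List.of_mem_filter this
      simp at this; omega
    have hs'cap : ∀ x ∈ s', x ≤ cap := by
      intro x hx
      have h1 : x ≤ s'.sum :=
        List.single_le_sum (fun y hy => by have := hs'pos y hy; omega) x hx
      omega
    have hs'valid : s'.Sublist valid := by
      have hfil := hs'sub.filter (fun x => decide (x ≤ cap))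
      rw [List.filter_eq_self.mpr (by intro x hx; simpa using hs'cap x hx)] at hfil
      rw [hvaliddef, sanitize_decomp hcap]
      exact hfil
    obtain ⟨k, hkMM, hklen⟩ := MM_ge valid hvalid_pos s' hs'valid
    have hs'sumnn : 0 ≤ s'.sum := List.sum_nonneg (fun x hx => by have := hs'pos x hx; omega)
    have hcast : ((s'.sum.toNat : Nat) : Int) = s'.sum := Int.toNat_of_nonneg hs'sumnn
    have hkC : k ∈ C := hCmem2 s'.sum.toNat (by omega) k (by rw [hcast]; exact hkMM)
    have hg_le : ∀ m, PySem.List.max? C (fun x => x) = some m → g ≤ m := by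
      intro m hm
      have := PySem.List.max?_isMax hm k hkC
      have hlen' : s'.length = s.length := hs'perm.length_eq
      simp only at this
      omega
    -- best ≤ g
    have hle_g : ∀ m ∈ C, m ≤ g := by
      intro m hm
      obtain ⟨t, ht, hMM⟩ := hCmem1 m hm
      obtain ⟨u, husub, husum, hulen⟩ := MM_some_achieve valid (t : Int) m hMM
      have huL : u.Subperm L := by
        have h1 : u.Sublist pos := by
          refine husub.trans ?_
          rw [hvaliddef, sanitize_decomp hcap]
          exact List.filter_sublist
        exact h1.subperm.trans hLperm.symm.subperm
      have htake : (L.take u.length).sum ≤ (t : Int) := by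
        have := take_min L (PySem.List.sorted_pairwise pos (fun w => w)) u huL
        omega
      have := greedy_prefix L cap u.length hLpos huL.length_le (by omega)
      omega
    rw [maxD_eq]
    rcases hm : PySem.List.max? C (fun x => x) with _ | m
    · -- C would be empty; but k ∈ C
      rw [PySem.List.max?_eq_none_iff] at hm
      rw [hm] at hkC
      simp at hkC
    · have h1 : g ≤ m := hg_le m hm
      have h2 : m ≤ g := hle_g m (PySem.List.max?_mem hm)
      have : m = g := le_antisymm h2 h1
      simp [this]
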